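-- pv_equiv track=rewrite | github.com/walley78/baekjoon_algorithm | 백준/Gold/17609. 회문/회문.py | iskindapelindrome
-- ===== SOURCE A (Python) =====
-- def ispelindrome(word):
--     # 거꾸로 했을때도 똑같으면 회문이지
--     return word == word[::-1]
--
-- def iskindapelindrome(word):
--     left, right = 0, len(word) - 1
--     while left < right:
--         if word[left] != word[right]:
--             # 왼쪽글자를 빼보거나 오른쪽글자를 빼보거나
--             skip_left = word[left+1:right+1]
--             skip_right = word[left:right]
--             return 1 if ispelindrome(skip_left) or ispelindrome(skip_right) else 2
--         left += 1
--         right -= 1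
--     return 2
-- ===== SOURCE B (Python) =====
-- def iskindapelindrome(word):
--     # Brute force: a string scores 2 if it is already a palindrome; otherwise 1
--     # if deleting some single character yields a palindrome, else 2.
--     if word == word[::-1]:
--         return 2
--     for k in range(len(word)):
--         t = word[:k] + word[k+1:]
--         if t == t[::-1]:
--             return 1
--     return 2
-- ===== Notes on version B (the rewrite author's own statement) =====
-- stated objective: alternative
-- what changed: Replaces A's two-pointer scan-to-first-mismatch with a brute-force search: return 2 if the word is a palindrome, otherwise try every single-character deletion word[:k]+word[k+1:] and return 1 iff some deletion is a palindrome; correctness rests on the theorem that a deletion fixing the string can always be taken at the first mismatched pair.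
import Mathlib
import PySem

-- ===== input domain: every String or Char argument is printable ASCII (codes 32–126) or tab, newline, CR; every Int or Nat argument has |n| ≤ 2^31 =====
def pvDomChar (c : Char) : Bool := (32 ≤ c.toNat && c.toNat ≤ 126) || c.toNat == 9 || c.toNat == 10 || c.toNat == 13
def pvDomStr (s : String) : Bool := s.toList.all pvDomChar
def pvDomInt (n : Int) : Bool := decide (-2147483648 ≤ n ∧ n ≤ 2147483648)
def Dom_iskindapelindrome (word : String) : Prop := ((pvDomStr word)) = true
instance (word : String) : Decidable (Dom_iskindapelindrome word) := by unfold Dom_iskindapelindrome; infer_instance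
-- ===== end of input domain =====

-- B replaces A's scan-to-first-mismatch by brute force: palindrome → 2, otherwise try
-- EVERY single-character deletion and return 1 iff some deletion is a palindrome.
-- Objective: alternative (the equivalence is the theorem that a fixing deletion can
-- always be taken at the first mismatched pair).

-- ===== PORT A =====
-- ispelindrome: word == word[::-1]  (s[::-1] is List.reverse, PySem.List.slice?_none_none_neg_one)
def ispelA (s : List Char) : Bool := s == s.reverse

-- the while loop of A over the two indices left/right
def loopA (w : List Char) (l r : Int) : Int :=
  if l < r then
    if PySem.List.pyGet? w l != PySem.List.pyGet? w r then
      let skipL := PySem.List.slice w (some (l + 1)) (some (r + 1))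
      let skipR := PySem.List.slice w (some l) (some r)
      if ispelA skipL || ispelA skipR then 1 else 2
    else loopA w (l + 1) (r - 1)
  else 2
termination_by (r - l).toNat
decreasing_by omega

def iskindapelindrome (word : String) : Int :=
  loopA word.toList 0 ((word.toList.length : Int) - 1)

-- ===== PORT B =====
-- 'word == word[::-1]' and 't == t[::-1]' compare with the reverse (PySem.List.slice?_none_none_neg_one);
-- the for-loop with early 'return 1' is the any-scan over range(len(word)).
def iskindapelindrome_alt (word : String) : Int :=
  let w := word.toList
  if w == w.reverse then 2
  else if (PySem.List.pyRange 0 (w.length : Int) 1).any (fun k =>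
        let t := PySem.List.slice w none (some k) ++ PySem.List.slice w (some (k + 1)) none
        t == t.reverse)
  then 1 else 2

-- ===== PRECONDITION & SPEC =====
def Spec_iskindapelindrome (word : String) (out : Int) : Prop := out = iskindapelindrome_alt word
instance (word : String) (out : Int) : Decidable (Spec_iskindapelindrome word out) := by unfold Spec_iskindapelindrome; infer_instance

-- ===== CLAIM (what is proved, stated in full; the proofs are below) =====
def Claim_equal_iskindapelindrome : Prop := ∀ (word : String), Dom_iskindapelindrome word → Spec_iskindapelindrome word (iskindapelindrome word)

-- ===== LEMMAS AND PROOFS =====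

-- the index-wise reading of "w is a palindrome" at position k
def PalAt (w : List Char) (k : Nat) : Prop := w[k]? = w[w.length - 1 - k]?

theorem palAt_of_eq_reverse (w : List Char) (h : w = w.reverse) (k : Nat) (hk : k < w.length) : PalAt w k := by
  unfold PalAt
  conv_lhs => rw [h]
  exact List.getElem?_reverse hk

theorem eq_reverse_of_palAt (w : List Char) (h : ∀ k, k < w.length → PalAt w k) : w = w.reverse := by
  apply List.ext_getElem?
  intro k
  by_cases hk : k < w.length
  · rw [List.getElem?_reverse hk]; exact h k hk
  · rw [List.getElem?_eq_none (by omega), List.getElem?_eq_none (by simp; omega)]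

-- A's loop returns 2 when every pair of mirror positions matches
theorem loop_pal (w : List Char) (h : ∀ k, k < w.length → PalAt w k) :
    ∀ (d : Nat) (l : Int), 0 ≤ l → ((w.length : Int) - 1 - l - l).toNat ≤ d →
      loopA w l ((w.length : Int) - 1 - l) = 2 := by
  intro d
  induction d with
  | zero =>
    intro l hl hd
    rw [loopA]
    have : ¬ (l < (w.length : Int) - 1 - l) := by omega
    simp [this]
  | succ d ih =>
    intro l hl hd
    rw [loopA]
    by_cases hlr : l < (w.length : Int) - 1 - l
    · have hkn : l.toNat < w.length := by omega
      have e1 : PySem.List.pyGet? w l = w[l.toNat]? := by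
        rw [← PySem.List.pyGet?_natCast w l.toNat]
        congr 1; omega
      have e2 : PySem.List.pyGet? w ((w.length : Int) - 1 - l) = w[w.length - 1 - l.toNat]? := by
        rw [← PySem.List.pyGet?_natCast w (w.length - 1 - l.toNat)]
        congr 1; omega
      have heq := h l.toNat hkn
      unfold PalAt at heq
      rw [if_pos hlr, e1, e2, heq]
      simp only [bne_self_eq_false, if_false, Bool.false_eq_true]
      have e3 : (w.length : Int) - 1 - l - 1 = (w.length : Int) - 1 - (l + 1) := by ring
      rw [e3]
      exact ih (l + 1) (by omega) (by omega)
    · simp [hlr]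

-- A's loop, started at or left of the first mismatch i, returns the deletion-slice test at i
theorem loop_mism (w : List Char) (i : Nat)
    (hpre : ∀ k, k < i → PalAt w k) (hmis : ¬ PalAt w i)
    (hlt : (i : Int) < (w.length : Int) - 1 - i) :
    ∀ (d : Nat) (l : Int), 0 ≤ l → l ≤ i → ((i : Int) - l).toNat ≤ d →
      loopA w l ((w.length : Int) - 1 - l) =
        (if ispelA (PySem.List.slice w (some ((i : Int) + 1)) (some ((w.length : Int) - 1 - i + 1))) ||
            ispelA (PySem.List.slice w (some (i : Int)) (some ((w.length : Int) - 1 - i))) then 1 else 2) := by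
  intro d
  induction d with
  | zero =>
    intro l hl hli hd
    have hl' : l = (i : Int) := by omega
    subst hl'
    rw [loopA, if_pos hlt]
    have e1 : PySem.List.pyGet? w (i : Int) = w[i]? := PySem.List.pyGet?_natCast w i
    have e2 : PySem.List.pyGet? w ((w.length : Int) - 1 - i) = w[w.length - 1 - i]? := by
      rw [← PySem.List.pyGet?_natCast w (w.length - 1 - i)]
      congr 1; omega
    unfold PalAt at hmis
    rw [e1, e2]
    simp only [bne_iff_ne, ne_eq, hmis, not_false_eq_true, if_true]
  | succ d ih =>
    intro l hl hli hd
    by_cases hl' : l = (i : Int)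
    · subst hl'
      rw [loopA, if_pos hlt]
      have e1 : PySem.List.pyGet? w (i : Int) = w[i]? := PySem.List.pyGet?_natCast w i
      have e2 : PySem.List.pyGet? w ((w.length : Int) - 1 - i) = w[w.length - 1 - i]? := by
        rw [← PySem.List.pyGet?_natCast w (w.length - 1 - i)]
        congr 1; omega
      unfold PalAt at hmis
      rw [e1, e2]
      simp only [bne_iff_ne, ne_eq, hmis, not_false_eq_true, if_true]
    · have hlr : l < (w.length : Int) - 1 - l := by omega
      rw [loopA, if_pos hlr]
      have hkn : l.toNat < w.length := by omega
      have e1 : PySem.List.pyGet? w l = w[l.toNat]? := by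
        rw [← PySem.List.pyGet?_natCast w l.toNat]; congr 1; omega
      have e2 : PySem.List.pyGet? w ((w.length : Int) - 1 - l) = w[w.length - 1 - l.toNat]? := by
        rw [← PySem.List.pyGet?_natCast w (w.length - 1 - l.toNat)]; congr 1; omega
      have heq := hpre l.toNat (by omega)
      unfold PalAt at heq
      rw [e1, e2, heq]
      simp only [bne_self_eq_false, if_false, Bool.false_eq_true]
      have e3 : (w.length : Int) - 1 - l - 1 = (w.length : Int) - 1 - (l + 1) := by ring
      rw [e3]
      exact ih (l + 1) (by omega) (by omega) (by omega)

-- "t is a palindrome", read index-wise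
def PalQ (t : List Char) : Prop := ∀ a, a < t.length → t[a]? = t[t.length - 1 - a]?

theorem palQ_iff_eq_reverse (t : List Char) : PalQ t ↔ t = t.reverse := by
  constructor
  · intro h; exact eq_reverse_of_palAt t h
  · intro h a ha; exact palAt_of_eq_reverse t h a ha

-- the deletion of position k
def del (w : List Char) (k : Nat) : List Char := w.take k ++ w.drop (k + 1)

theorem length_del (w : List Char) (k : Nat) (hk : k < w.length) :
    (del w k).length = w.length - 1 := by
  unfold del; simp; omega

theorem getElem?_del (w : List Char) (k a : Nat) (hk : k < w.length) :
    (del w k)[a]? = if a < k then w[a]? else w[a + 1]? := by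
  unfold del
  by_cases h : a < k
  · rw [List.getElem?_append_left (by simp; omega), List.getElem?_take, if_pos h, if_pos h]
  · rw [List.getElem?_append_right (by simp; omega), List.getElem?_drop, if_neg h]
    congr 1
    simp
    omega

-- the middle slices: mid w s m = w[s : s+m]
def mid (w : List Char) (s m : Nat) : List Char := (w.drop s).take m

theorem length_mid (w : List Char) (s m : Nat) (h : s + m ≤ w.length) :
    (mid w s m).length = m := by
  unfold mid; simp; omega

theorem getElem?_mid (w : List Char) (s m a : Nat) (ha : a < m) :
    (mid w s m)[a]? = w[s + a]? := by
  unfold mid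
  rw [List.getElem?_take, if_pos ha, List.getElem?_drop]

-- ===== the combinatorial core: around the first mismatch (i, j), i + j + 1 = n,
-- some single deletion is a palindrome iff one of A's two middle slices is =====

-- deleting at the left end of the mismatch when the left middle slice is a palindrome
theorem del_left_of_skipL (w : List Char) (n i j : Nat) (hn : n = w.length)
    (hij : i < j) (hsum : i + j + 1 = n)
    (hpre : ∀ a, a < i → w[a]? = w[n - 1 - a]?)
    (hL : PalQ (mid w (i + 1) (j - i))) : PalQ (del w i) := by
  have hjn : j < n := by omega
  have hin : i < n := by omega
  have hlen : (del w i).length = n - 1 := by rw [hn] at hin ⊢; exact length_del w i hin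
  have hmlen : (mid w (i + 1) (j - i)).length = j - i := by
    apply length_mid; omega
  intro a ha
  rw [hlen] at ha ⊢
  rw [getElem?_del w i a (by omega), getElem?_del w i (n - 1 - 1 - a) (by omega)]
  by_cases h1 : a < i
  · rw [if_pos h1, if_neg (by omega)]
    have := hpre a h1
    rw [this]; congr 1; omega
  · by_cases h2 : n - 1 - 1 - a < i
    · rw [if_neg h1, if_pos h2]
      have := hpre (n - 2 - a) (by omega)
      rw [show n - 1 - (n - 2 - a) = a + 1 from by omega] at this
      rw [← this, show n - 1 - 1 - a = n - 2 - a from by omega]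
    · -- both indices in the middle: use the slice palindrome
      rw [if_neg h1, if_neg h2]
      have hc : a - i < j - i := by omega
      have := hL (a - i) (by rw [hmlen]; omega)
      rw [hmlen, getElem?_mid w (i+1) (j-i) (a-i) hc,
          getElem?_mid w (i+1) (j-i) (j - i - 1 - (a - i)) (by omega)] at this
      rw [show a + 1 = i + 1 + (a - i) from by omega, this]
      congr 1; omega

-- deleting at the right end of the mismatch when the right middle slice is a palindrome
theorem del_right_of_skipR (w : List Char) (n i j : Nat) (hn : n = w.length)
    (hij : i < j) (hsum : i + j + 1 = n)
    (hpre : ∀ a, a < i → w[a]? = w[n - 1 - a]?)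
    (hR : PalQ (mid w i (j - i))) : PalQ (del w j) := by
  have hjn : j < n := by omega
  have hlen : (del w j).length = n - 1 := by rw [hn] at hjn ⊢; exact length_del w j hjn
  have hmlen : (mid w i (j - i)).length = j - i := by apply length_mid; omega
  intro a ha
  rw [hlen] at ha ⊢
  rw [getElem?_del w j a (by omega), getElem?_del w j (n - 1 - 1 - a) (by omega)]
  by_cases h1 : a < i
  · rw [if_pos (by omega), if_neg (by omega)]
    have := hpre a h1
    rw [this]; congr 1; omega
  · by_cases h2 : n - 1 - 1 - a < i
    · rw [if_neg (by omega), if_pos (by omega)]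
      have := hpre (n - 2 - a) (by omega)
      rw [show n - 1 - (n - 2 - a) = a + 1 from by omega] at this
      rw [← this, show n - 1 - 1 - a = n - 2 - a from by omega]
    · -- both indices inside [i, j): use the slice palindrome
      rw [if_pos (by omega), if_pos (by omega)]
      have hc : a - i < j - i := by omega
      have := hR (a - i) (by rw [hmlen]; omega)
      rw [hmlen, getElem?_mid w i (j-i) (a-i) hc,
          getElem?_mid w i (j-i) (j - i - 1 - (a - i)) (by omega)] at this
      rw [show a = i + (a - i) from by omega, this]
      congr 1; omega

-- a palindromic deletion at k ≤ i forces the left middle slice to be a palindrome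
theorem skipL_of_del_le (w : List Char) (n i j k : Nat) (hn : n = w.length)
    (hij : i < j) (hsum : i + j + 1 = n) (hki : k ≤ i)
    (hD : PalQ (del w k)) : PalQ (mid w (i + 1) (j - i)) := by
  have hkn : k < n := by omega
  have hlen : (del w k).length = n - 1 := by rw [hn] at hkn ⊢; exact length_del w k hkn
  have hmlen : (mid w (i + 1) (j - i)).length = j - i := by apply length_mid; omega
  intro c hc
  rw [hmlen] at hc ⊢
  rw [getElem?_mid w (i+1) (j-i) c hc, getElem?_mid w (i+1) (j-i) (j - i - 1 - c) (by omega)]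
  have := hD (i + c) (by omega)
  rw [hlen, getElem?_del w k (i + c) (by omega), getElem?_del w k (n - 1 - 1 - (i + c)) (by omega),
      if_neg (by omega), if_neg (by omega)] at this
  rw [show i + 1 + c = i + c + 1 from by omega, this]
  congr 1; omega

-- a palindromic deletion at k ≥ j forces the right middle slice to be a palindrome
theorem skipR_of_del_ge (w : List Char) (n i j k : Nat) (hn : n = w.length)
    (hij : i < j) (hsum : i + j + 1 = n) (hjk : j ≤ k) (hkn : k < n)
    (hD : PalQ (del w k)) : PalQ (mid w i (j - i)) := by
  have hlen : (del w k).length = n - 1 := by rw [hn] at hkn ⊢; exact length_del w k hkn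
  have hmlen : (mid w i (j - i)).length = j - i := by apply length_mid; omega
  intro c hc
  rw [hmlen] at hc ⊢
  rw [getElem?_mid w i (j-i) c hc, getElem?_mid w i (j-i) (j - i - 1 - c) (by omega)]
  have := hD (i + c) (by omega)
  rw [hlen, getElem?_del w k (i + c) (by omega), getElem?_del w k (n - 1 - 1 - (i + c)) (by omega),
      if_pos (by omega), if_pos (by omega)] at this
  rw [this]
  congr 1; omega

-- no deletion strictly between the mismatched pair can be a palindrome
theorem no_del_between (w : List Char) (n i j k : Nat) (hn : n = w.length)
    (hij : i < j) (hsum : i + j + 1 = n) (hik : i < k) (hkj : k < j)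
    (hmis : w[i]? ≠ w[n - 1 - i]?) : ¬ PalQ (del w k) := by
  intro hD
  have hkn : k < n := by omega
  have hlen : (del w k).length = n - 1 := by rw [hn] at hkn ⊢; exact length_del w k hkn
  have := hD i (by omega)
  rw [hlen, getElem?_del w k i (by omega), getElem?_del w k (n - 1 - 1 - i) (by omega),
      if_pos hik, if_neg (by omega)] at this
  apply hmis
  rw [this]; congr 1; omega

-- the two directions combined
theorem exists_del_iff (w : List Char) (n i j : Nat) (hn : n = w.length)
    (hij : i < j) (hsum : i + j + 1 = n)
    (hpre : ∀ a, a < i → w[a]? = w[n - 1 - a]?)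
    (hmis : w[i]? ≠ w[n - 1 - i]?) :
    (∃ k, k < n ∧ PalQ (del w k)) ↔
      (PalQ (mid w (i + 1) (j - i)) ∨ PalQ (mid w i (j - i))) := by
  constructor
  · rintro ⟨k, hkn, hD⟩
    by_cases h1 : k ≤ i
    · exact Or.inl (skipL_of_del_le w n i j k hn hij hsum h1 hD)
    · by_cases h2 : j ≤ k
      · exact Or.inr (skipR_of_del_ge w n i j k hn hij hsum h2 hkn hD)
      · exact absurd hD (no_del_between w n i j k hn hij hsum (by omega) (by omega) hmis)
  · rintro (hL | hR)
    · exact ⟨i, by omega, del_left_of_skipL w n i j hn hij hsum hpre hL⟩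
    · exact ⟨j, by omega, del_right_of_skipR w n i j hn hij hsum hpre hR⟩

-- A's Int slices are the Nat middle slices
theorem sliceA_left (w : List Char) (n i j : Nat) (hn : n = w.length) (hsum : i + j + 1 = n) :
    PySem.List.slice w (some ((i : Int) + 1)) (some ((n : Int) - 1 - i + 1)) = mid w (i + 1) (j - i) := by
  have e1 : (i : Int) + 1 = ((i + 1 : Nat) : Int) := by norm_cast
  have e2 : (n : Int) - 1 - i + 1 = ((j + 1 : Nat) : Int) := by omega
  rw [e1, e2, PySem.List.slice_natCast]
  unfold mid
  congr 1
  omega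

theorem sliceA_right (w : List Char) (n i j : Nat) (hn : n = w.length) (hsum : i + j + 1 = n) :
    PySem.List.slice w (some (i : Int)) (some ((n : Int) - 1 - i)) = mid w i (j - i) := by
  have e2 : (n : Int) - 1 - i = ((j : Nat) : Int) := by omega
  rw [e2, PySem.List.slice_natCast]
  rfl

-- B's deletion expression is del
theorem sliceB_del (w : List Char) (k : Nat) :
    PySem.List.slice w none (some (k : Int)) ++ PySem.List.slice w (some ((k : Int) + 1)) none = del w k := by
  have e : (k : Int) + 1 = ((k + 1 : Nat) : Int) := by push_cast; ring
  rw [PySem.List.slice_to_natCast, e, PySem.List.slice_from_natCast]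
  rfl

-- B's any-scan hits a palindromic deletion iff one exists
theorem anyB_iff (w : List Char) :
    ((PySem.List.pyRange 0 (w.length : Int) 1).any (fun k =>
        let t := PySem.List.slice w none (some k) ++ PySem.List.slice w (some (k + 1)) none
        t == t.reverse) = true) ↔ (∃ k, k < w.length ∧ PalQ (del w k)) := by
  rw [List.any_eq_true]
  constructor
  · rintro ⟨x, hx, ht⟩
    rw [PySem.List.mem_pyRange_one] at hx
    refine ⟨x.toNat, by omega, ?_⟩
    rw [palQ_iff_eq_reverse, ← sliceB_del w x.toNat]
    have ex : ((x.toNat : Nat) : Int) = x := by omega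
    rw [ex]
    simpa using ht
  · rintro ⟨k, hk, hD⟩
    refine ⟨(k : Int), ?_, ?_⟩
    · rw [PySem.List.mem_pyRange_one]; omega
    · simp only []
      rw [sliceB_del w k]
      rw [palQ_iff_eq_reverse] at hD
      simpa using hD

-- the two ports agree on every string
theorem iskinda_eq (word : String) : iskindapelindrome word = iskindapelindrome_alt word := by
  unfold iskindapelindrome iskindapelindrome_alt
  set w := word.toList with hw
  by_cases hpal : w = w.reverse
  · have h2 : loopA w 0 ((w.length : Int) - 1 - 0) = 2 :=
      loop_pal w (fun k hk => palAt_of_eq_reverse w hpal k hk) (w.length + 1) 0 le_rfl (by omega)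
    simp only [sub_zero] at h2
    have hb : (w == w.reverse) = true := beq_iff_eq.mpr hpal
    rw [h2]
    simp [hb]
  · -- find the first mismatch (proof machinery only)
    set p : Char × Char → Bool := fun p => p.1 != p.2 with hp
    set zs := w.zip w.reverse with hzs
    have hzlen : zs.length = w.length := by simp [hzs]
    have hex : ∃ x ∈ zs, p x = true := by
      by_contra hno
      push Not at hno
      apply hpal
      apply List.ext_getElem (by simp)
      intro k h1 h2
      have hk : k < zs.length := by omega
      have := hno zs[k] (List.getElem_mem hk)
      simpa [hzs, hp, List.getElem_zip] using this
    have hilt : zs.findIdx p < zs.length := List.findIdx_lt_length_of_exists hex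
    set i := zs.findIdx p with hi
    have hin : i < w.length := by omega
    have hn1 : w.length - 1 - i < w.length := by omega
    have hrev : w.reverse[i]'(by simpa using hin) = w[w.length - 1 - i]'hn1 :=
      List.getElem_reverse _
    have hmisv : w[i]'hin ≠ w[w.length - 1 - i]'hn1 := by
      have hfi := List.findIdx_getElem (w := hilt)
      rw [← hrev]
      simpa [hzs, hp, List.getElem_zip] using hfi
    have hmis : ¬ PalAt w i := by
      unfold PalAt
      rw [List.getElem?_eq_getElem hin, List.getElem?_eq_getElem hn1]
      simpa using hmisv
    have hpre : ∀ k, k < i → PalAt w k := by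
      intro k hk
      have hkw : k < w.length := by omega
      have hnl := List.not_of_lt_findIdx (p := p) (xs := zs) hk
      have heq2 : w[k]'hkw = w.reverse[k]'(by simpa using hkw) := by
        simpa [hzs, hp, List.getElem_zip] using hnl
      have heqk : w[k]'hkw = w[w.length - 1 - k]'(by omega) := by
        rw [heq2]; exact List.getElem_reverse _
      unfold PalAt
      rw [List.getElem?_eq_getElem hkw, List.getElem?_eq_getElem (by omega : w.length - 1 - k < w.length), heqk]
    have hne : i ≠ w.length - 1 - i := fun h => hmis (by unfold PalAt; rw [← h])
    have hgt : ¬ (w.length - 1 - i < i) := by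
      intro h
      have hp2 := hpre (w.length - 1 - i) h
      unfold PalAt at hp2
      have e : w.length - 1 - (w.length - 1 - i) = i := by omega
      rw [e] at hp2
      exact hmis (by unfold PalAt; exact hp2.symm)
    have hlt : (i : Int) < (w.length : Int) - 1 - i := by omega
    have hres := loop_mism w i hpre hmis hlt i 0 le_rfl (by omega) (by omega)
    simp only [sub_zero] at hres
    have hb : (w == w.reverse) = false := by simp [hpal]
    rw [hres]
    simp only [hb, Bool.false_eq_true, if_false]
    -- now compare the two conditions
    set n := w.length with hnn
    set j := n - 1 - i with hj
    have hij : i < j := by omega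
    have hsum : i + j + 1 = n := by omega
    have hpreQ : ∀ a, a < i → w[a]? = w[n - 1 - a]? := by
      intro a ha
      have := hpre a ha
      unfold PalAt at this
      exact this
    have hmisQ : w[i]? ≠ w[n - 1 - i]? := by
      intro h; exact hmis h
    have hiff := exists_del_iff w n i j rfl hij hsum hpreQ hmisQ
    have hanyiff := anyB_iff w
    rw [sliceA_left w n i j rfl hsum, sliceA_right w n i j rfl hsum]
    unfold ispelA
    by_cases hA : PalQ (mid w (i + 1) (j - i)) ∨ PalQ (mid w i (j - i))
    · have hany : ((PySem.List.pyRange 0 (w.length : Int) 1).any _) = true :=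
        hanyiff.mpr (hiff.mpr hA)
      rw [if_pos ?_, if_pos hany]
      rcases hA with h | h
      · rw [palQ_iff_eq_reverse] at h
        simp [beq_iff_eq.mpr h]
      · rw [palQ_iff_eq_reverse] at h
        simp [beq_iff_eq.mpr h]
    · push Not at hA
      have hany : ¬ ((PySem.List.pyRange 0 (w.length : Int) 1).any (fun k =>
            let t := PySem.List.slice w none (some k) ++ PySem.List.slice w (some (k + 1)) none
            t == t.reverse) = true) := fun h => (not_or.mpr hA) (hiff.mp (hanyiff.mp h))
      rw [if_neg ?_, if_neg hany]
      intro h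
      rcases Bool.or_eq_true_iff.mp h with h | h
      · exact hA.1 ((palQ_iff_eq_reverse _).mpr (beq_iff_eq.mp h))
      · exact hA.2 ((palQ_iff_eq_reverse _).mpr (beq_iff_eq.mp h))

-- ===== VERDICT (by name: the statement is the Claim_ definition above) =====
theorem iskindapelindrome_spec : Claim_equal_iskindapelindrome := by
  intro word _
  unfold Spec_iskindapelindrome
  exact iskinda_eq word
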